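-- pv_equiv track=rewrite | github.com/RagnarLothbrok7/Mision-09 | Mision_09.py | calcularSuma
-- ===== SOURCE A (Python) =====
-- def calcularSuma(lista):
--     nuevaLista = lista.copy()
--     if 13 not in nuevaLista:
--         return sum(nuevaLista)
--     else:
--         for n in range(len(nuevaLista)):
--             if nuevaLista[n] == 13:
--                 if n != 0:
--                     nuevaLista[n - 1] = 0
--                 if n != len(nuevaLista) - 1:
--                     nuevaLista[n + 1] = 0
--                     nuevaLista[n] = 0
--     suma = sum(nuevaLista)
--     return suma
-- ===== SOURCE B (Python) =====
-- def calcularSuma(lista):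
--     xs = lista.copy()
--     total = 0
--     zeroed = False
--     for x, y in zip(xs, xs[1:]):
--         if zeroed:
--             zeroed = False
--         elif x == 13:
--             zeroed = True
--         elif y != 13:
--             total += x
--     if xs:
--         total += 0 if zeroed else xs[-1]
--     return total
-- ===== Notes on version B (the rewrite author's own statement) =====
-- stated objective: alternative
-- what changed: B replaces A's copy-mutate-then-sum (membership test, index loop zeroing neighbours in a list copy, final sum) by a single forward pass over adjacent pairs that accumulates the total directly with one 'zeroed' flag, never building or mutating a list.
import Mathlib
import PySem

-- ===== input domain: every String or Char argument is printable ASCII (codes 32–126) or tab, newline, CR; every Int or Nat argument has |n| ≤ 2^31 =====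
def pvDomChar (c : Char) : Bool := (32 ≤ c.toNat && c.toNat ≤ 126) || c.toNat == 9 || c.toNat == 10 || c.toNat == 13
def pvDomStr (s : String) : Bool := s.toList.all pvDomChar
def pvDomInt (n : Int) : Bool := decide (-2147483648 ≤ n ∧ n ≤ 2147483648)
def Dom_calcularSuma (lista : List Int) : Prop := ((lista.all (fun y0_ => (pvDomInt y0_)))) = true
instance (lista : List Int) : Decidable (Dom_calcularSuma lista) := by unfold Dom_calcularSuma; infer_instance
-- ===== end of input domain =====

-- B is a single forward pass over adjacent pairs accumulating the total directly,
-- instead of A's copy-then-mutate-then-sum; return values agree on every list (proved below).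

-- ===== PORT A =====
-- the 'for n in range(len(nuevaLista))' loop: fuel counts the remaining indices
def calcularSumaLoop (L : List Int) (fuel n : Nat) : List Int :=
  match fuel with
  | 0 => L
  | fuel + 1 =>
    let L' :=
      if L.getD n 0 = 13 then
        let L1 := if n ≠ 0 then L.set (n - 1) 0 else L
        if n ≠ L.length - 1 then (L1.set (n + 1) 0).set n 0 else L1
      else L
    calcularSumaLoop L' fuel (n + 1)

def calcularSuma (lista : List Int) : Int :=
  let nuevaLista := lista
  if ¬ (13 ∈ nuevaLista) then nuevaLista.sum
  else ((calcularSumaLoop nuevaLista nuevaLista.length 0).sum)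

-- ===== PORT B =====
-- the 'for x, y in zip(xs, xs[1:])' loop with state (total, zeroed), then the last element
def calcularSumaAltGo : List Int → Bool → Int
  | [], _ => 0
  | [x], zeroed => if zeroed then 0 else x
  | x :: y :: rest, zeroed =>
    if zeroed then calcularSumaAltGo (y :: rest) false
    else if x = 13 then calcularSumaAltGo (y :: rest) true
    else (if y = 13 then 0 else x) + calcularSumaAltGo (y :: rest) false

def calcularSuma_alt (lista : List Int) : Int :=
  calcularSumaAltGo lista false

-- ===== PRECONDITION & SPEC =====
def Spec_calcularSuma (lista : List Int) (out : Int) : Prop := out = calcularSuma_alt lista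
instance (lista : List Int) (out : Int) : Decidable (Spec_calcularSuma lista out) := by unfold Spec_calcularSuma; infer_instance

-- ===== CLAIM (what is proved, stated in full; the proofs are below) =====
def Claim_equal_calcularSuma : Prop := ∀ (lista : List Int), Dom_calcularSuma lista → Spec_calcularSuma lista (calcularSuma lista)

-- ===== LEMMAS AND PROOFS =====

-- head of the suffix zeroed when the previous element was a live (triggering) 13
def pvMzHead (z : Bool) : List Int → List Int
  | [] => []
  | x :: r => (if z then 0 else x) :: r

lemma pv_getD_len (pre : List Int) (x : Int) (r : List Int) {n : Nat} (h : n = pre.length) :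
    (pre ++ x :: r).getD n 0 = x := by
  subst h
  induction pre with
  | nil => rfl
  | cons a t ih => simpa using ih

lemma pv_set_at (pre : List Int) (x v : Int) (r : List Int) {n : Nat} (h : n = pre.length) :
    (pre ++ x :: r).set n v = pre ++ v :: r := by
  subst h
  induction pre with
  | nil => rfl
  | cons a t ih => simp [ih]

lemma pvMzHead_false (l : List Int) : pvMzHead false l = l := by
  cases l <;> simp [pvMzHead]

-- one loop step at an index holding a non-13 value leaves the list unchanged
lemma pv_loop_skip (pre : List Int) (v : Int) (hv : ¬ v = 13) (rest : List Int) :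
    calcularSumaLoop (pre ++ v :: rest) (rest.length + 1) pre.length
      = calcularSumaLoop ((pre ++ [v]) ++ rest) rest.length (pre ++ [v]).length := by
  simp only [calcularSumaLoop, pv_getD_len pre v rest rfl, if_neg hv]
  simp

-- one unfolding of the loop (used to step only the left-hand side)
lemma pv_loop_succ (L : List Int) (f n : Nat) :
    calcularSumaLoop L (f + 1) n
      = calcularSumaLoop
          (if L.getD n 0 = 13 then
            (if (n ≠ L.length - 1) then
              ((if n ≠ 0 then L.set (n - 1) 0 else L).set (n + 1) 0).set n 0
            else (if n ≠ 0 then L.set (n - 1) 0 else L))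
          else L) f (n + 1) := rfl

lemma pv_loop_lemma : ∀ (suf pre : List Int) (z : Bool),
    (calcularSumaLoop (pre ++ pvMzHead z suf) suf.length pre.length).sum
      = (if z = false ∧ suf.head? = some 13 ∧ pre ≠ [] then pre.dropLast.sum else pre.sum)
        + calcularSumaAltGo suf z := by
  intro suf
  induction suf with
  | nil =>
    intro pre z
    simp [pvMzHead, calcularSumaLoop, calcularSumaAltGo]
  | cons x rest ih =>
    intro pre z
    cases z with
    | true =>
      -- current element already zeroed by the previous trigger: no trigger here
      rw [show pvMzHead true (x :: rest) = 0 :: rest from by simp [pvMzHead],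
          List.length_cons, pv_loop_skip pre 0 (by norm_num) rest]
      have hih := ih (pre ++ [0]) false
      rw [pvMzHead_false] at hih
      rw [hih]
      cases rest with
      | nil => simp [calcularSumaAltGo]
      | cons y rs =>
        by_cases hy : y = (13 : Int) <;>
          simp [calcularSumaAltGo, hy, List.dropLast_concat]
    | false =>
      rw [show pvMzHead false (x :: rest) = x :: rest from pvMzHead_false _]
      by_cases hx : x = (13 : Int)
      · -- live 13: zero the left neighbour, and (unless last) the right neighbour and itself
        subst hx
        rcases pre.eq_nil_or_concat with hpre | ⟨q, a, hpre⟩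
        · subst hpre
          cases rest with
          | nil => simp [calcularSumaLoop, calcularSumaAltGo]
          | cons y rs =>
            have step : calcularSumaLoop (([] : List Int) ++ 13 :: y :: rs) (13 :: y :: rs).length ([] : List Int).length
                = calcularSumaLoop ((([] : List Int) ++ [0]) ++ pvMzHead true (y :: rs)) (y :: rs).length (([] : List Int) ++ [(0:Int)]).length := by
              simp [calcularSumaLoop, pvMzHead, List.set]
            rw [step, ih]
            simp [calcularSumaAltGo]
        · rw [List.concat_eq_append] at hpre
          subst hpre
          cases rest with
          | nil =>
            -- last index: only the left neighbour is zeroed, the trailing 13 stays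
            have hset : ((q ++ [a]) ++ [(13:Int)]).set ((q ++ [a]).length - 1) 0
                = q ++ 0 :: [(13 : Int)] := by
              have := pv_set_at q a [(13:Int)] (v := 0) (n := (q ++ [a]).length - 1) (by simp)
              simpa using this
            simp only [calcularSumaLoop, List.length_cons, List.length_nil]
            rw [if_pos (pv_getD_len (q ++ [a]) 13 ([]) (n := (q ++ [a]).length) rfl)]
            rw [if_neg (by simp : ¬ (q ++ [a]).length ≠ ((q ++ [a]) ++ [(13:Int)]).length - 1)]
            rw [if_pos (by simp : (q ++ [a]).length ≠ 0)]
            rw [hset]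
            simp [calcularSumaLoop, calcularSumaAltGo, List.dropLast_concat]
          | cons y rs =>
            have h1 : ((q ++ [a]) ++ 13 :: y :: rs).set ((q ++ [a]).length - 1) 0
                = q ++ 0 :: 13 :: y :: rs := by
              have := pv_set_at q a (13 :: y :: rs) (v := 0) (n := (q ++ [a]).length - 1) (by simp)
              simpa using this
            have h2 : (q ++ 0 :: 13 :: y :: rs).set ((q ++ [a]).length + 1) 0
                = q ++ 0 :: 13 :: 0 :: rs := by
              have := pv_set_at (q ++ [(0:Int), 13]) y 0 rs (n := (q ++ [a]).length + 1) (by simp)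
              simpa using this
            have h3 : (q ++ 0 :: 13 :: 0 :: rs).set (q ++ [a]).length 0
                = q ++ 0 :: 0 :: 0 :: rs := by
              have := pv_set_at (q ++ [(0:Int)]) 13 0 (0 :: rs) (n := (q ++ [a]).length) (by simp)
              simpa using this
            have step : calcularSumaLoop ((q ++ [a]) ++ 13 :: y :: rs) (13 :: y :: rs).length (q ++ [a]).length
                = calcularSumaLoop (((q ++ [(0:Int)]) ++ [0]) ++ pvMzHead true (y :: rs)) (y :: rs).length ((q ++ [(0:Int)]) ++ [(0:Int)]).length := by
              rw [show (13 :: y :: rs).length = (y :: rs).length + 1 from rfl, pv_loop_succ]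
              rw [if_pos (pv_getD_len (q ++ [a]) 13 (y :: rs) (n := (q ++ [a]).length) rfl)]
              rw [if_pos (by simp : (q ++ [a]).length ≠ 0)]
              rw [if_pos (by simp : (q ++ [a]).length ≠ ((q ++ [a]) ++ 13 :: y :: rs).length - 1)]
              rw [h1, h2, h3]
              simp [pvMzHead]
            rw [step, ih]
            simp [calcularSumaAltGo, List.dropLast_concat]
      · -- ordinary element: nothing happens at this index
        rw [List.length_cons, pv_loop_skip pre x hx rest]
        have hih := ih (pre ++ [x]) false
        rw [pvMzHead_false] at hih
        rw [hih]
        cases rest with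
        | nil => simp [calcularSumaAltGo, hx]
        | cons y rs =>
          by_cases hy : y = (13 : Int) <;>
            simp [calcularSumaAltGo, hx, hy, List.dropLast_concat] <;> ring

lemma pv_no13 (l : List Int) (h : ¬ (13 ∈ l)) : l.sum = calcularSumaAltGo l false := by
  induction l with
  | nil => simp [calcularSumaAltGo]
  | cons x rest ih =>
    have hx : x ≠ (13 : Int) := by intro hc; exact h (by simp [hc])
    have hr : ¬ (13 ∈ rest) := fun hc => h (by simp [hc])
    cases rest with
    | nil => simp [calcularSumaAltGo, hx]
    | cons y rs =>
      have hy : y ≠ (13 : Int) := by intro hc; exact hr (by simp [hc])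
      simp only [calcularSumaAltGo, if_neg hx, if_neg hy]
      rw [← ih hr]
      simp [List.sum_cons]

-- ===== VERDICT (by name: the statement is the Claim_ definition above) =====
theorem calcularSuma_spec : Claim_equal_calcularSuma := by
  intro lista _
  unfold Spec_calcularSuma calcularSuma calcularSuma_alt
  by_cases h : (13 : Int) ∈ lista
  · rw [if_neg (by simpa using h)]
    have := pv_loop_lemma lista [] false
    cases lista with
    | nil => simp at h
    | cons a t => simpa [pvMzHead] using pv_loop_lemma (a :: t) [] false
  · rw [if_pos (by simpa using h)]
    exact pv_no13 lista h
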